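-- pv_equiv track=rewrite | github.com/abhishekrajgaria/Mapwise | scripts/evaluate.py | parse_ranking_string
-- ===== SOURCE A (Python) =====
-- from collections import defaultdict
--
-- def parse_ranking_string(ranking_string: str) -> dict:
--     """
--     Convert the ranking string to dictionary
--     like
--     rank1: [stat1, stat2], rank2: [state3]
--     """
--     items = []
--     current_item = ""
--     relations = []
--     for char in ranking_string:
--         if char in ["<", ">", "="]:
--             items.append(current_item.strip())
--             items.append(char)
--             current_item = ""
--             relations.append(char)
--         else:
--             current_item += char
--     items.append(current_item.strip())
--     rank_dict = defaultdict(list)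
--     current_rank = 1
--     min_rank = 1
--     for i, item in enumerate(items):
--         if item in ["<", ">", "="]:
--             continue
--         rank_dict[current_rank].append(item)
--         if i < len(items) - 1:
--             if items[i + 1] == "<":
--                 current_rank += 1
--             elif items[i + 1] == ">":
--                 current_rank -= 1
--                 min_rank = min(min_rank, current_rank)
--     if min_rank < 1:
--         diff = 1 - min_rank
--         rank_dict = {key + diff: value for key, value in rank_dict.items()}
--     return rank_dict
-- ===== SOURCE B (Python) =====
-- def parse_ranking_string(ranking_string: str) -> dict:
--     """
--     Convert the ranking string to dictionary
--     like
--     rank1: [stat1, stat2], rank2: [state3]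
--     """
--     rank_dict = {}
--     current_item = ""
--     current_rank = 1
--     min_rank = 1
--     for char in ranking_string:
--         if char in "<>=":
--             rank_dict.setdefault(current_rank, []).append(current_item.strip())
--             current_item = ""
--             if char == "<":
--                 current_rank += 1
--             elif char == ">":
--                 current_rank -= 1
--                 min_rank = min(min_rank, current_rank)
--         else:
--             current_item += char
--     rank_dict.setdefault(current_rank, []).append(current_item.strip())
--     if min_rank < 1:
--         diff = 1 - min_rank
--         rank_dict = {key + diff: value for key, value in rank_dict.items()}
--     return rank_dict
-- ===== Notes on version B (the rewrite author's own statement) =====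
-- stated objective: simpler
-- what changed: Replaced A's two passes (tokenize the string into an items/operators list, then a second enumerate loop assigning ranks by peeking at the next operator) with a single streaming pass over the characters that appends each completed item and adjusts current_rank/min_rank the moment an operator is seen.
import Mathlib
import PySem

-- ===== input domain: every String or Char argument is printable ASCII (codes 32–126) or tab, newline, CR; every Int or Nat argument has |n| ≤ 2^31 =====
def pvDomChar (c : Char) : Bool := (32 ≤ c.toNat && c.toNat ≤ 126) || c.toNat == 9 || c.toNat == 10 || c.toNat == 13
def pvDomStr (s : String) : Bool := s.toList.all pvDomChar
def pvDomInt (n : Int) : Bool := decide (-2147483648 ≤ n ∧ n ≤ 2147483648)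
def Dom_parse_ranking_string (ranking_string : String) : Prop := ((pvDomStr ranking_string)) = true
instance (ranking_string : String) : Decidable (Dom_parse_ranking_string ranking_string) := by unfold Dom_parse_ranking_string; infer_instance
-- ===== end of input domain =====

-- B replaces A's two passes (tokenize into an items/operators list, then a second
-- enumerate loop assigning ranks by peeking at the next operator) with one streaming
-- pass over the characters that assigns ranks as the operators are met (objective:
-- simpler, one pass instead of two).

-- ===== PORT A =====
-- tokenizer step of A's first loop: state = (items, current_item, relations)
def pvAStep (st : List String × List Char × List String) (char : Char) :
    List String × List Char × List String :=
  if char = '<' ∨ char = '>' ∨ char = '=' then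
    (st.1 ++ [String.ofList (PySem.Chars.strip st.2.1), String.ofList [char]], [],
     st.2.2 ++ [String.ofList [char]])
  else
    (st.1, st.2.1 ++ [char], st.2.2)

-- A's second loop: for each non-operator item append at current_rank, then peek at
-- the next element (always the operator) to adjust current_rank / min_rank
def pvARanks : List String → Int → Int → PySem.Dict Int (List String) →
    PySem.Dict Int (List String) × Int
  | [], _, min_rank, rank_dict => (rank_dict, min_rank)
  | item :: rest, current_rank, min_rank, rank_dict =>
    if item = "<" ∨ item = ">" ∨ item = "=" then
      pvARanks rest current_rank min_rank rank_dict
    else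
      match rest with
      | [] => (rank_dict.modify current_rank [] (· ++ [item]), min_rank)
      | nxt :: _ =>
        if nxt = "<" then
          pvARanks rest (current_rank + 1) min_rank
            (rank_dict.modify current_rank [] (· ++ [item]))
        else if nxt = ">" then
          pvARanks rest (current_rank - 1) (min min_rank (current_rank - 1))
            (rank_dict.modify current_rank [] (· ++ [item]))
        else
          pvARanks rest current_rank min_rank
            (rank_dict.modify current_rank [] (· ++ [item]))

def parse_ranking_string (ranking_string : String) : List (Int × List String) :=
  let st := ranking_string.toList.foldl pvAStep ([], [], [])
  let items := st.1 ++ [String.ofList (PySem.Chars.strip st.2.1)]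
  let res := pvARanks items 1 1 PySem.Dict.empty
  if res.2 < 1 then
    let diff := 1 - res.2
    (res.1.items.foldl (fun d p => d.insert (p.1 + diff) p.2)
      (PySem.Dict.empty : PySem.Dict Int (List String))).items
  else res.1.items

-- ===== PORT B =====
-- streaming step of B: state = (rank_dict, current_item, current_rank, min_rank)
def pvBStep (st : PySem.Dict Int (List String) × List Char × Int × Int) (char : Char) :
    PySem.Dict Int (List String) × List Char × Int × Int :=
  if char = '<' ∨ char = '>' ∨ char = '=' then
    let d := st.1.modify st.2.2.1 [] (· ++ [String.ofList (PySem.Chars.strip st.2.1)])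
    if char = '<' then (d, [], st.2.2.1 + 1, st.2.2.2)
    else if char = '>' then (d, [], st.2.2.1 - 1, min st.2.2.2 (st.2.2.1 - 1))
    else (d, [], st.2.2.1, st.2.2.2)
  else (st.1, st.2.1 ++ [char], st.2.2.1, st.2.2.2)

def parse_ranking_string_alt (ranking_string : String) : List (Int × List String) :=
  let st := ranking_string.toList.foldl pvBStep (PySem.Dict.empty, [], 1, 1)
  let d := st.1.modify st.2.2.1 [] (· ++ [String.ofList (PySem.Chars.strip st.2.1)])
  if st.2.2.2 < 1 then
    let diff := 1 - st.2.2.2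
    (d.items.foldl (fun d2 p => d2.insert (p.1 + diff) p.2)
      (PySem.Dict.empty : PySem.Dict Int (List String))).items
  else d.items

-- ===== PRECONDITION & SPEC =====
def Spec_parse_ranking_string (ranking_string : String) (out : List (Int × List String)) : Prop := out = parse_ranking_string_alt ranking_string
instance (ranking_string : String) (out : List (Int × List String)) : Decidable (Spec_parse_ranking_string ranking_string out) := by unfold Spec_parse_ranking_string; infer_instance

-- ===== CLAIM (what is proved, stated in full; the proofs are below) =====
def Claim_equal_parse_ranking_string : Prop := ∀ (ranking_string : String), Dom_parse_ranking_string ranking_string → Spec_parse_ranking_string ranking_string (parse_ranking_string ranking_string)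

-- ===== LEMMAS AND PROOFS =====

-- a current_item never contains an operator character
def pvNoOp (cs : List Char) : Prop := ∀ c ∈ cs, c ≠ '<' ∧ c ≠ '>' ∧ c ≠ '='

theorem pv_mem_strip {c : Char} {cs : List Char} (h : c ∈ PySem.Chars.strip cs) : c ∈ cs := by
  unfold PySem.Chars.strip PySem.Chars.rstrip PySem.Chars.lstrip at h
  have h1 : c ∈ (List.dropWhile PySem.Chars.isspace cs).reverse :=
    (List.dropWhile_sublist PySem.Chars.isspace).mem (List.mem_reverse.mp h)
  exact (List.dropWhile_sublist PySem.Chars.isspace).mem (List.mem_reverse.mp h1)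

theorem pv_strip_not_op {cs : List Char} (h : pvNoOp cs) :
    String.ofList (PySem.Chars.strip cs) ≠ "<" ∧ String.ofList (PySem.Chars.strip cs) ≠ ">" ∧
      String.ofList (PySem.Chars.strip cs) ≠ "=" := by
  refine ⟨?_, ?_, ?_⟩ <;> intro he
  · have : PySem.Chars.strip cs = ['<'] := by
      simpa using congrArg String.toList he
    exact (h '<' (pv_mem_strip (by simp [this]))).1 rfl
  · have : PySem.Chars.strip cs = ['>'] := by
      simpa using congrArg String.toList he
    exact (h '>' (pv_mem_strip (by simp [this]))).2.1 rfl
  · have : PySem.Chars.strip cs = ['='] := by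
      simpa using congrArg String.toList he
    exact (h '=' (pv_mem_strip (by simp [this]))).2.2 rfl

-- the tokenizer fold only appends to items/relations: accumulators factor out
theorem pvAStep_accum (cs : List Char) : ∀ (I : List String) (ci : List Char) (R : List String),
    cs.foldl pvAStep (I, ci, R) =
      (I ++ (cs.foldl pvAStep ([], ci, [])).1, (cs.foldl pvAStep ([], ci, [])).2.1,
       R ++ (cs.foldl pvAStep ([], ci, [])).2.2) := by
  induction cs with
  | nil => intro I ci R; simp
  | cons c cs ih =>
    intro I ci R
    by_cases hc : c = '<' ∨ c = '>' ∨ c = '='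
    · simp only [List.foldl_cons, pvAStep, if_pos hc, List.nil_append]
      rw [ih (I ++ [String.ofList (PySem.Chars.strip ci), String.ofList [c]]) []
            (R ++ [String.ofList [c]])]
      conv_rhs => rw [ih [String.ofList (PySem.Chars.strip ci), String.ofList [c]] []
            [String.ofList [c]]]
      simp
    · simp only [List.foldl_cons, pvAStep, if_neg hc]
      exact ih I (ci ++ [c]) R

-- A's second loop skips operator tokens
theorem pv_skip (x : String) (hx : x = "<" ∨ x = ">" ∨ x = "=") (X : List String) (r mr : Int)
    (d : PySem.Dict Int (List String)) : pvARanks (x :: X) r mr d = pvARanks X r mr d := by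
  rcases hx with h | h | h <;> subst h <;> (rw [pvARanks.eq_def]; simp)

-- the core one-pass/two-pass correspondence
theorem pv_main (cs : List Char) : ∀ (ci : List Char) (r mr : Int)
    (d : PySem.Dict Int (List String)), pvNoOp ci →
    pvARanks ((cs.foldl pvAStep ([], ci, [])).1 ++
        [String.ofList (PySem.Chars.strip (cs.foldl pvAStep ([], ci, [])).2.1)]) r mr d =
      ((cs.foldl pvBStep (d, ci, r, mr)).1.modify (cs.foldl pvBStep (d, ci, r, mr)).2.2.1 []
          (· ++ [String.ofList (PySem.Chars.strip (cs.foldl pvBStep (d, ci, r, mr)).2.1)]),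
       (cs.foldl pvBStep (d, ci, r, mr)).2.2.2) := by
  induction cs with
  | nil =>
    intro ci r mr d hci
    obtain ⟨h1, h2, h3⟩ := pv_strip_not_op hci
    simp only [List.foldl_nil, List.nil_append, pvARanks]
    rw [if_neg (by simp [h1, h2, h3])]
  | cons c cs ih =>
    intro ci r mr d hci
    have hnil : pvNoOp ([] : List Char) := by intro c hc; simp at hc
    obtain ⟨h1, h2, h3⟩ := pv_strip_not_op hci
    by_cases hc : c = '<' ∨ c = '>' ∨ c = '='
    · simp only [List.foldl_cons, pvAStep, pvBStep, if_pos hc]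
      rw [pvAStep_accum cs ([] ++ [String.ofList (PySem.Chars.strip ci), String.ofList [c]]) []
            ([] ++ [String.ofList [c]])]
      simp only [List.nil_append, List.cons_append]
      rcases hc with hc | hc | hc <;> subst hc
      · rw [pvARanks, if_neg (by simp [h1, h2, h3])]
        simp only [show String.ofList ['<'] = "<" from rfl, String.reduceEq, Char.reduceEq,
          reduceIte]
        rw [pv_skip _ (by left; rfl), ih [] (r + 1) mr _ hnil]
      · rw [pvARanks, if_neg (by simp [h1, h2, h3])]
        simp only [show String.ofList ['>'] = ">" from rfl, String.reduceEq, Char.reduceEq,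
          reduceIte]
        rw [pv_skip _ (by right; left; rfl), ih [] (r - 1) (min mr (r - 1)) _ hnil]
      · rw [pvARanks, if_neg (by simp [h1, h2, h3])]
        simp only [show String.ofList ['='] = "=" from rfl, String.reduceEq, Char.reduceEq,
          reduceIte]
        rw [pv_skip _ (by right; right; rfl), ih [] r mr _ hnil]
    · simp only [List.foldl_cons, pvAStep, pvBStep, if_neg hc]
      refine ih (ci ++ [c]) r mr d ?_
      intro x hx
      rcases List.mem_append.mp hx with hx | hx
      · exact hci x hx
      · simp at hx; subst hx
        exact ⟨fun h => hc (Or.inl h), fun h => hc (Or.inr (Or.inl h)),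
          fun h => hc (Or.inr (Or.inr h))⟩

-- ===== VERDICT (by name: the statement is the Claim_ definition above) =====
theorem parse_ranking_string_spec : Claim_equal_parse_ranking_string := by
  intro s _
  unfold Spec_parse_ranking_string parse_ranking_string parse_ranking_string_alt
  have h := pv_main s.toList [] 1 1 PySem.Dict.empty (by intro c hc; simp at hc)
  dsimp only []
  rw [h]
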